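-- pv_equiv track=rewrite | github.com/MrBrantCode/unitest_baseline | mut_generate/mist_train_taco/taco_3178/solution.py | count_biscuit_selections
-- ===== SOURCE A (Python) =====
-- def count_biscuit_selections(N, P, A):
--     # Calculate the number of odd and even bags
--     O = sum([a % 2 for a in A])
--     E = N - O
--
--     # Precompute factorials up to 50
--     fa = [1]
--     for i in range(1, 51):
--         fa.append(fa[-1] * i)
--
--     # Calculate the number of valid selections
--     ans = 0
--     for i in range(P, O + 1, 2):
--         ans += fa[O] // (fa[i] * fa[O - i])
--
--     # Multiply by the number of ways to choose even bags
--     return ans * 2 ** E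
-- ===== SOURCE B (Python) =====
-- def count_biscuit_selections(N, P, A):
--     # Pascal-triangle DP instead of factorials: build row O incrementally.
--     O = sum(1 for a in A if a % 2 != 0)
--     row = [1]
--     for _ in range(O):
--         row = [x + y for x, y in zip([0] + row, row + [0])]
--     ans = sum(row[i] for i in range(P, O + 1, 2))
--     return ans * 2 ** (N - O)
-- ===== Notes on version B (the rewrite author's own statement) =====
-- stated objective: alternative
-- what changed: Replaces A's precomputed factorial table and factorial-ratio binomials fa[O]//(fa[i]*fa[O-i]) by an incrementally built Pascal-triangle row (additive DP), summing its entries directly.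
-- outside the precondition, e.g. on count_biscuit_selections(2, -1, [1, 1]): A returns 2, B returns 3; on count_biscuit_selections(0, 0, [1]): A returns 0.5, B returns 0.5
import Mathlib
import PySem

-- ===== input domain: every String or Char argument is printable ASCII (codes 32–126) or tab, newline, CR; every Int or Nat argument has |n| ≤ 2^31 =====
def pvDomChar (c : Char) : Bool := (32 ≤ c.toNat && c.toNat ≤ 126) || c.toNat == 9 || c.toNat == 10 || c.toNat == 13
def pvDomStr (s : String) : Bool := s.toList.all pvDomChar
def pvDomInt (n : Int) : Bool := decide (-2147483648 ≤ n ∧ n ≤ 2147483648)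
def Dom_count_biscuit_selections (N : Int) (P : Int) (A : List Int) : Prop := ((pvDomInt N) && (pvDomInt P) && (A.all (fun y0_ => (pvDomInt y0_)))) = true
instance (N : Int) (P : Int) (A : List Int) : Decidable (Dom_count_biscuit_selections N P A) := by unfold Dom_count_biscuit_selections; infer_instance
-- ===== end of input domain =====

-- B replaces A's factorial table and factorial-ratio binomials by an incrementally built
-- Pascal-triangle row (additive DP); same value on Pre_, objective: alternative algorithm.

-- ===== PORT A =====
-- fa = [1]; for i in range(1, 51): fa.append(fa[-1] * i)
def pvA_fa : List Int :=
  (PySem.List.pyRange 1 51 1).foldl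
    (fun fa i => fa ++ [((PySem.List.pyGet? fa (-1)).getD 0) * i]) [1]

def count_biscuit_selections (N : Int) (P : Int) (A : List Int) : Int :=
  let O : Int := (A.map (fun a => PySem.Int.mod a 2)).sum
  let E : Int := N - O
  -- for i in range(P, O+1, 2): ans += fa[O] // (fa[i] * fa[O-i]); inside Pre_ every index is in range
  let ans : Int := (PySem.List.pyRange P (O + 1) 2).foldl
    (fun ans i => ans + PySem.Int.floordiv ((PySem.List.pyGet? pvA_fa O).getD 0)
        (((PySem.List.pyGet? pvA_fa i).getD 0) * ((PySem.List.pyGet? pvA_fa (O - i)).getD 0))) 0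
  -- 2 ** E; exact for 0 ≤ E, which Pre_ guarantees
  ans * 2 ^ E.toNat

-- ===== PORT B =====
-- row = [x + y for x, y in zip([0] + row, row + [0])]
def pvPascalNext (r : List Int) : List Int := List.zipWith (· + ·) (0 :: r) (r ++ [0])

def count_biscuit_selections_alt (N : Int) (P : Int) (A : List Int) : Int :=
  let O : Int := ((A.filter (fun a => PySem.Int.mod a 2 != 0)).length : Int)
  let row : List Int := (PySem.List.pyRange 0 O 1).foldl (fun r _ => pvPascalNext r) [1]
  let ans : Int := ((PySem.List.pyRange P (O + 1) 2).map
    (fun i => (PySem.List.pyGet? row i).getD 0)).sum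
  -- 2 ** (N - O); exact for O ≤ N, which Pre_ guarantees
  ans * 2 ^ (N - O).toNat

-- ===== PRECONDITION & SPEC =====
-- Pre_ excludes: P < 0 (A reads fa with a wrapped or out-of-range negative index — IndexError
-- or an accidental value), more than 50 odd elements (A raises IndexError on fa[O]), and
-- odd count > N (A computes 2 ** negative, a float, not an int).
def Pre_count_biscuit_selections (N : Int) (P : Int) (A : List Int) : Prop :=
  0 ≤ P ∧ ((A.countP (fun a => PySem.Int.mod a 2 != 0) : Int) ≤ N)
    ∧ A.countP (fun a => PySem.Int.mod a 2 != 0) ≤ 50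
instance (N : Int) (P : Int) (A : List Int) : Decidable (Pre_count_biscuit_selections N P A) := by
  unfold Pre_count_biscuit_selections; infer_instance
def pvWitness_count_biscuit_selections : Int × Int × List Int := (5, 2, [1, 3, 2, 5, 4])

def Spec_count_biscuit_selections (N : Int) (P : Int) (A : List Int) (out : Int) : Prop := out = count_biscuit_selections_alt N P A
instance (N : Int) (P : Int) (A : List Int) (out : Int) : Decidable (Spec_count_biscuit_selections N P A out) := by unfold Spec_count_biscuit_selections; infer_instance

-- ===== CLAIM (what is proved, stated in full; the proofs are below) =====
def Claim_equal_count_biscuit_selections : Prop := ∀ (N : Int) (P : Int) (A : List Int), Dom_count_biscuit_selections N P A → Pre_count_biscuit_selections N P A → Spec_count_biscuit_selections N P A (count_biscuit_selections N P A)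

-- ===== LEMMAS AND PROOFS =====

-- A's sum of a % 2 counts the odd elements
theorem pv_sum_mod_two (A : List Int) :
    (A.map (fun a => PySem.Int.mod a 2)).sum = (A.countP (fun a => PySem.Int.mod a 2 != 0) : Int) := by
  induction A with
  | nil => simp
  | cons a t ih =>
    simp only [List.map_cons, List.sum_cons, List.countP_cons, ih]
    rcases PySem.Int.mod_two_eq a with h | h <;> rw [h] <;> (push_cast; simp; try omega)

-- the factorial table A builds
theorem pvA_fa_eq : pvA_fa = (List.range 51).map (fun n => (n.factorial : Int)) := by decide

theorem pv_fa_get (k : Nat) (hk : k ≤ 50) :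
    (PySem.List.pyGet? pvA_fa (k : Int)).getD 0 = (k.factorial : Int) := by
  rw [pvA_fa_eq, PySem.List.pyGet?_natCast]
  simp [Nat.lt_succ_of_le hk]

-- one Pascal step sends row n to row n+1
theorem pv_pascalNext_row (n : Nat) :
    pvPascalNext ((List.range (n + 1)).map (fun i => (n.choose i : Int))) =
      (List.range (n + 2)).map (fun i => ((n + 1).choose i : Int)) := by
  apply List.ext_getElem
  · simp [pvPascalNext]
  · intro j h1 h2
    have hj : j < n + 2 := by simpa using h2
    simp only [pvPascalNext, List.getElem_zipWith]
    rcases j with _ | j'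
    · simp
    · have hj' : j' < n + 1 := by omega
      rw [List.getElem_cons_succ]
      by_cases hc : j' + 1 < n + 1
      · rw [List.getElem_append_left (by simpa using hc)]
        simp only [List.getElem_map, List.getElem_range]
        rw [Nat.choose_succ_succ]
        push_cast; ring
      · have hj1 : j' = n := by omega
        subst hj1
        rw [List.getElem_append_right (by simp)]
        simp

-- B's loop builds row o of Pascal's triangle
theorem pv_row_eq (o : Nat) :
    (PySem.List.pyRange 0 (o : Int) 1).foldl (fun r _ => pvPascalNext r) [1] =
      (List.range (o + 1)).map (fun i => (o.choose i : Int)) := by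
  induction o with
  | zero => simp [PySem.List.pyRange_one_eq_nil (by omega : (0:Int) ≤ 0)]
  | succ n ih =>
    have hsp : ((n + 1 : Nat) : Int) = (n : Int) + 1 := by push_cast; ring
    rw [hsp, PySem.List.pyRange_one_succ_right (by positivity), List.foldl_append, ih]
    simpa using pv_pascalNext_row n

-- the factorial ratio is the binomial coefficient
theorem pv_floordiv_choose (o i : Nat) (h : i ≤ o) :
    PySem.Int.floordiv (o.factorial : Int) ((i.factorial : Int) * (((o - i).factorial : Nat) : Int))
      = (o.choose i : Int) := by
  have key := Nat.choose_mul_factorial_mul_factorial h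
  have hpos : (0 : Int) < (i.factorial : Int) * (((o - i).factorial : Nat) : Int) := by positivity
  have ha : (o.factorial : Int) = (o.choose i : Int) * ((i.factorial : Int) * (((o - i).factorial : Nat) : Int)) := by
    rw [← mul_assoc]; exact_mod_cast key.symm
  rw [PySem.Int.floordiv_eq_iff_of_pos hpos]
  constructor
  · rw [ha]
  · rw [ha]; nlinarith [hpos]

theorem count_biscuit_selections_spec_aux (N P : Int) (A : List Int)
    (hP : 0 ≤ P) (_hN : ((A.countP (fun a => PySem.Int.mod a 2 != 0) : Int) ≤ N))
    (h50 : A.countP (fun a => PySem.Int.mod a 2 != 0) ≤ 50) :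
    count_biscuit_selections N P A = count_biscuit_selections_alt N P A := by
  set o : Nat := A.countP (fun a => PySem.Int.mod a 2 != 0) with ho
  have hA : count_biscuit_selections N P A =
      ((PySem.List.pyRange P ((A.map (fun a => PySem.Int.mod a 2)).sum + 1) 2).foldl
        (fun ans i => ans + PySem.Int.floordiv
          ((PySem.List.pyGet? pvA_fa ((A.map (fun a => PySem.Int.mod a 2)).sum)).getD 0)
          (((PySem.List.pyGet? pvA_fa i).getD 0) *
            ((PySem.List.pyGet? pvA_fa ((A.map (fun a => PySem.Int.mod a 2)).sum - i)).getD 0))) 0)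
      * 2 ^ (N - (A.map (fun a => PySem.Int.mod a 2)).sum).toNat := rfl
  have hB : count_biscuit_selections_alt N P A =
      (((PySem.List.pyRange P (((A.filter (fun a => PySem.Int.mod a 2 != 0)).length : Int) + 1) 2).map
        (fun i => (PySem.List.pyGet?
          ((PySem.List.pyRange 0 ((A.filter (fun a => PySem.Int.mod a 2 != 0)).length : Int) 1).foldl
            (fun r _ => pvPascalNext r) [1]) i).getD 0)).sum)
      * 2 ^ (N - ((A.filter (fun a => PySem.Int.mod a 2 != 0)).length : Int)).toNat := rfl
  have hlen : ((A.filter (fun a => PySem.Int.mod a 2 != 0)).length : Int) = (o : Int) := by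
    simp [ho, List.countP_eq_length_filter]
  rw [hA, hB, pv_sum_mod_two, ← ho, hlen, pv_row_eq, PySem.List.foldl_add, zero_add]
  refine congrArg (fun z => z * 2 ^ (N - (o : Int)).toNat) ?_
  refine congrArg List.sum (List.map_congr_left ?_)
  intro i hi
  have hmem := (PySem.List.mem_pyRange_iff_of_pos (by norm_num) i).mp hi
  have hiP : P ≤ i := hmem.1
  have hio : i ≤ (o : Int) := by omega
  have hi0 : 0 ≤ i := le_trans hP hiP
  set k : Nat := i.toNat with hk
  have hik : i = (k : Int) := by omega
  have hko : k ≤ o := by omega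
  rw [hik, pv_fa_get o h50, pv_fa_get k (le_trans hko h50)]
  have hsub : (o : Int) - (k : Int) = ((o - k : Nat) : Int) := by omega
  rw [hsub, pv_fa_get (o - k) (by omega)]
  rw [pv_floordiv_choose o k hko]
  rw [PySem.List.pyGet?_natCast]
  simp [Nat.lt_succ_of_le hko]

-- ===== VERDICT (by name: the statement is the Claim_ definition above) =====
theorem count_biscuit_selections_spec : Claim_equal_count_biscuit_selections := by
  intro N P A _ hpre
  rcases hpre with ⟨hP, hN, h50⟩
  exact count_biscuit_selections_spec_aux N P A hP hN h50
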